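-- pv_equiv track=rewrite | github.com/Nareeek/Codesignal_tasks | insertDashes.py | insertDashes
-- ===== SOURCE A (Python) =====
-- def insertDashes(inputString):
--     inp = inputString
--
--     if len(inp) < 2:
--         return inp
--
--     i = 1
--     while i < len(inp):
--         if inp[i - 1].isalpha() and inp[i].isalpha():
--             inp = inp[0: i] + '-' + inp[i: len(inp)]
--         i += 1
--
--     return inp
-- ===== SOURCE B (Python) =====
-- from itertools import groupby
--
--
-- def insertDashes(inputString):
--     pieces = []
--     for isLetter, group in groupby(inputString, key=str.isalpha):
--         chars = list(group)
--         pieces.append('-'.join(chars) if isLetter else ''.join(chars))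
--     return ''.join(pieces)
-- ===== Notes on version B (the rewrite author's own statement) =====
-- stated objective: faster
-- what changed: Replaces A's index loop, which rebuilds the whole string by slicing and concatenation at every adjacent letter pair, with a single itertools.groupby pass over maximal isalpha-runs: alphabetic runs are joined with a dash and the pieces concatenated.
import Mathlib
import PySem

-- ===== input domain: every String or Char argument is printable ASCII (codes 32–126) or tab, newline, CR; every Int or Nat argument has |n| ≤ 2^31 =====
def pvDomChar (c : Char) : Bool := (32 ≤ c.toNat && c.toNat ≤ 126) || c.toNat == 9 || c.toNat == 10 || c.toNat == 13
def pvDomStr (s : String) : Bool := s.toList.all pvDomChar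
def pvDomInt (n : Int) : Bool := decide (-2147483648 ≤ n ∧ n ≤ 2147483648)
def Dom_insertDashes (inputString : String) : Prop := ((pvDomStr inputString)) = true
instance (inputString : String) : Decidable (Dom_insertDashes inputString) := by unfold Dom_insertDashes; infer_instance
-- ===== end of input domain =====

-- B replaces A's quadratic index loop (rebuilding the string at each adjacent letter pair)
-- with one groupby pass over maximal isalpha-runs; objective: faster (measured), same return value.


-- ===== PORT A =====
-- inp[j].isalpha() for an in-range index (the loop only reads in-range positions)
def pvAlphaAt (inp : List Char) (j : Int) : Bool :=
  match PySem.List.pyGet? inp j with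
  | some c => PySem.Chars.isalpha c
  | none => false

-- A's while loop; fuel is only a totality guard (the proof shows 2*len+2 always suffices)
def pvLoopA : Nat → List Char → Nat → List Char
  | 0, inp, _ => inp
  | fuel + 1, inp, i =>
    if i < inp.length then
      if pvAlphaAt inp ((i : Int) - 1) && pvAlphaAt inp (i : Int) then
        pvLoopA fuel
          (PySem.List.slice inp (some 0) (some (i : Int)) ++ ['-'] ++
            PySem.List.slice inp (some (i : Int)) (some (inp.length : Int)))
          (i + 1)
      else pvLoopA fuel inp (i + 1)
    else inp

def insertDashes (inputString : String) : String :=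
  let inp := inputString.toList
  if inp.length < 2 then inputString
  else String.ofList (pvLoopA (2 * inp.length + 2) inp 1)

-- ===== PORT B =====
-- itertools.groupby(s, key=str.isalpha): maximal runs of same-isalpha characters, with their key
def pvGroups : List Char → List (Bool × List Char)
  | [] => []
  | c :: cs =>
    let k := PySem.Chars.isalpha c
    (k, c :: cs.takeWhile (fun d => PySem.Chars.isalpha d == k)) ::
      pvGroups (cs.dropWhile (fun d => PySem.Chars.isalpha d == k))
termination_by l => l.length
decreasing_by
  exact Nat.lt_succ_of_le (List.length_dropWhile_le _ _)

-- '-'.join(chars) if isLetter else ''.join(chars), concatenated with ''.join(pieces)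
def insertDashes_alt (inputString : String) : String :=
  String.ofList (PySem.Chars.join []
    ((pvGroups inputString.toList).map (fun g =>
      if g.1 then PySem.Chars.join ['-'] (g.2.map (fun c => [c]))
      else PySem.Chars.join [] (g.2.map (fun c => [c])))))

-- ===== PRECONDITION & SPEC =====
def Spec_insertDashes (inputString : String) (out : String) : Prop := out = insertDashes_alt inputString
instance (inputString : String) (out : String) : Decidable (Spec_insertDashes inputString out) := by unfold Spec_insertDashes; infer_instance

-- ===== CLAIM (what is proved, stated in full; the proofs are below) =====
def Claim_equal_insertDashes : Prop := ∀ (inputString : String), Dom_insertDashes inputString → Spec_insertDashes inputString (insertDashes inputString)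

-- ===== LEMMAS AND PROOFS =====

-- the common characterisation: a dash between every adjacent pair of letters
def pvDash : List Char → List Char
  | [] => []
  | [c] => [c]
  | a :: b :: rest =>
    if PySem.Chars.isalpha a && PySem.Chars.isalpha b then a :: '-' :: pvDash (b :: rest)
    else a :: pvDash (b :: rest)

theorem pvDash_short (l : List Char) (h : l.length ≤ 1) : pvDash l = l := by
  match l, h with
  | [], _ => rfl
  | [c], _ => rfl

theorem pvJoin_nil_cons (p : List Char) (ps : List (List Char)) :
    PySem.Chars.join [] (p :: ps) = p ++ PySem.Chars.join [] ps := by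
  cases ps with
  | nil => simp [PySem.Chars.join_singleton, PySem.Chars.join_nil]
  | cons q rest => simp [PySem.Chars.join_cons_cons]

theorem pvHead_dropWhile (p : Char → Bool) :
    ∀ (l : List Char) (d : Char), (l.dropWhile p).head? = some d → p d = false := by
  intro l
  induction l with
  | nil => intro d h; simp at h
  | cons a t ih =>
    intro d h
    by_cases hp : p a
    · rw [List.dropWhile_cons, if_pos hp] at h
      exact ih d h
    · rw [List.dropWhile_cons, if_neg hp] at h
      simp only [List.head?_cons, Option.some.injEq] at h
      rw [← h]
      simpa using hp

theorem pvDash_head (c : Char) (run rest : List Char)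
    (hrun : ∀ d ∈ run, PySem.Chars.isalpha d = PySem.Chars.isalpha c)
    (hrest : ∀ d, rest.head? = some d → PySem.Chars.isalpha d ≠ PySem.Chars.isalpha c) :
    pvDash (c :: (run ++ rest)) =
      (if PySem.Chars.isalpha c
        then PySem.Chars.join ['-'] ((c :: run).map (fun x => [x]))
        else c :: run) ++ pvDash rest := by
  induction run generalizing c with
  | nil =>
    cases rest with
    | nil =>
      simp [pvDash, PySem.Chars.join_singleton]
    | cons d rest' =>
      have hd : PySem.Chars.isalpha d ≠ PySem.Chars.isalpha c := hrest d rfl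
      have hcond : (PySem.Chars.isalpha c && PySem.Chars.isalpha d) = false := by
        cases hc : PySem.Chars.isalpha c <;> cases hdd : PySem.Chars.isalpha d <;>
          simp_all
      simp only [List.nil_append, pvDash, hcond, Bool.false_eq_true, if_false]
      split <;> simp [PySem.Chars.join_singleton]
  | cons b run' ih =>
    have hb : PySem.Chars.isalpha b = PySem.Chars.isalpha c := hrun b (by simp)
    have ih' := ih b (fun d hd => (hrun d (by simp [hd])).trans hb.symm)
      (fun d hd => fun he => hrest d hd (he.trans hb))
    cases hc : PySem.Chars.isalpha c with
    | true =>
      have hcond : (PySem.Chars.isalpha c && PySem.Chars.isalpha b) = true := by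
        simp [hc, hb]
      simp only [List.cons_append, pvDash, hcond, if_true]
      rw [ih']
      rw [hb, hc] at *
      simp [PySem.Chars.join_cons_cons]
    | false =>
      have hcond : (PySem.Chars.isalpha c && PySem.Chars.isalpha b) = false := by
        simp [hc]
      simp only [List.cons_append, pvDash, hcond, Bool.false_eq_true, if_false]
      rw [ih']
      rw [hb, hc] at *
      simp

theorem pvGroups_eq (l : List Char) :
    PySem.Chars.join []
      ((pvGroups l).map (fun g =>
        if g.1 then PySem.Chars.join ['-'] (g.2.map (fun c => [c]))
        else PySem.Chars.join [] (g.2.map (fun c => [c])))) = pvDash l := by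
  have H : ∀ (n : Nat) (l : List Char), l.length ≤ n →
      PySem.Chars.join []
        ((pvGroups l).map (fun g =>
          if g.1 then PySem.Chars.join ['-'] (g.2.map (fun c => [c]))
          else PySem.Chars.join [] (g.2.map (fun c => [c])))) = pvDash l := by
    intro n
    induction n with
    | zero =>
      intro l hl
      have : l = [] := List.length_eq_zero_iff.mp (Nat.le_zero.mp hl)
      subst this
      simp [pvGroups, pvDash, PySem.Chars.join_nil]
    | succ m ih =>
      intro l hl
      cases l with
      | nil => simp [pvGroups, pvDash, PySem.Chars.join_nil]
      | cons c cs =>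
        rw [pvGroups]
        simp only [List.map_cons]
        rw [pvJoin_nil_cons]
        rw [ih (cs.dropWhile (fun d => PySem.Chars.isalpha d == PySem.Chars.isalpha c))
          (by calc (cs.dropWhile _).length ≤ cs.length := List.length_dropWhile_le _ _
                _ ≤ m := by simpa using hl)]
        have hsplit : cs = cs.takeWhile (fun d => PySem.Chars.isalpha d == PySem.Chars.isalpha c)
            ++ cs.dropWhile (fun d => PySem.Chars.isalpha d == PySem.Chars.isalpha c) :=
          (List.takeWhile_append_dropWhile).symm
        conv_rhs => rw [show (c :: cs) = c :: (cs.takeWhile (fun d => PySem.Chars.isalpha d == PySem.Chars.isalpha c)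
            ++ cs.dropWhile (fun d => PySem.Chars.isalpha d == PySem.Chars.isalpha c)) from by rw [← hsplit]]
        rw [pvDash_head c _ _
          (fun d hd => by simpa using List.mem_takeWhile_imp hd)
          (fun d hd => by
            have := pvHead_dropWhile _ _ _ hd
            simp at this
            exact this)]
        have hgl : PySem.Chars.join []
            ((cs.takeWhile (fun d => PySem.Chars.isalpha d == PySem.Chars.isalpha c)).map (fun x => [x])
              |> fun t => [c] :: t |> fun _ => ([c] :: (cs.takeWhile (fun d => PySem.Chars.isalpha d == PySem.Chars.isalpha c)).map (fun x => [x]))) =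
            c :: cs.takeWhile (fun d => PySem.Chars.isalpha d == PySem.Chars.isalpha c) := by
          simpa using PySem.Chars.join_nil_singletons
            (c :: cs.takeWhile (fun d => PySem.Chars.isalpha d == PySem.Chars.isalpha c))
        split
        · rfl
        · simpa using congrArg (· ++ pvDash (cs.dropWhile (fun d => PySem.Chars.isalpha d == PySem.Chars.isalpha c))) hgl
  exact H l.length l le_rfl

theorem pvLoopA_eq : ∀ (fuel : Nat) (inp : List Char) (i : Nat), 1 ≤ i →
    2 * (inp.length - i) + 2 ≤ fuel →
    pvLoopA fuel inp i = inp.take (i - 1) ++ pvDash (inp.drop (i - 1)) := by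
  intro fuel
  induction fuel using Nat.strong_induction_on with
  | _ fuel ih =>
    intro inp i h1 hf
    obtain ⟨f, rfl⟩ : ∃ f, fuel = f + 1 := by cases fuel with
      | zero => omega
      | succ f => exact ⟨f, rfl⟩
    rw [pvLoopA]
    by_cases hi : i < inp.length
    · simp only [hi, if_true]
      have hi1 : i - 1 < inp.length := by omega
      have hA : pvAlphaAt inp ((i : Int) - 1) = PySem.Chars.isalpha inp[i - 1] := by
        unfold pvAlphaAt
        rw [show ((i : Int) - 1) = ((i - 1 : Nat) : Int) from by omega, PySem.List.pyGet?_natCast]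
        simp [List.getElem?_eq_getElem hi1]
      have hB : pvAlphaAt inp (i : Int) = PySem.Chars.isalpha inp[i] := by
        unfold pvAlphaAt
        rw [PySem.List.pyGet?_natCast]
        simp [List.getElem?_eq_getElem hi]
      have hdrop1 : inp.drop (i - 1) = inp[i - 1] :: inp.drop i := by
        rw [List.drop_eq_getElem_cons hi1, show i - 1 + 1 = i from by omega]
      have hdrop2 : inp.drop i = inp[i] :: inp.drop (i + 1) := List.drop_eq_getElem_cons hi
      have htake : inp.take i = inp.take (i - 1) ++ [inp[i - 1]] := by
        conv_lhs => rw [show i = (i - 1) + 1 from by omega]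
        rw [List.take_add_one]
        simp [List.getElem?_eq_getElem hi1]
      rw [hA, hB]
      by_cases hab : (PySem.Chars.isalpha inp[i - 1] && PySem.Chars.isalpha inp[i]) = true
      · simp only [hab, if_true]
        have hs1 : PySem.List.slice inp (some (0 : Int)) (some (i : Int)) = inp.take i := by
          rw [show ((0 : Int)) = ((0 : Nat) : Int) from rfl, PySem.List.slice_natCast]
          simp
        have hs2 : PySem.List.slice inp (some (i : Int)) (some (inp.length : Int)) = inp.drop i := by
          rw [PySem.List.slice_natCast]
          exact List.take_of_length_le (by simp)
        rw [hs1, hs2]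
        obtain ⟨f', rfl⟩ : ∃ f', f = f' + 1 := by cases f with
          | zero => omega
          | succ f' => exact ⟨f', rfl⟩
        rw [pvLoopA]
        have hlen' : (inp.take i ++ ['-'] ++ inp.drop i).length = inp.length + 1 := by
          simp
        have hi' : i + 1 < (inp.take i ++ ['-'] ++ inp.drop i).length := by omega
        simp only [hi', if_true]
        have hmid : (inp.take i ++ ['-'] ++ inp.drop i)[i]'(by omega) = '-' := by
          rw [List.getElem_append_left (by simp [List.length_take]; omega)]
          rw [List.getElem_append_right (by simp [List.length_take])]
          simp [List.length_take, Nat.min_eq_left (le_of_lt hi)]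
        have hA' : pvAlphaAt (inp.take i ++ ['-'] ++ inp.drop i) ((↑(i + 1) : Int) - 1) = false := by
          unfold pvAlphaAt
          rw [show ((↑(i + 1) : Int) - 1) = ((i : Nat) : Int) from by omega, PySem.List.pyGet?_natCast]
          rw [List.getElem?_eq_getElem (by omega)]
          rw [hmid]
          rfl
        rw [hA']
        simp only [Bool.false_and, Bool.false_eq_true, if_false]
        rw [ih f' (by omega) _ (i + 2) (by omega) (by rw [hlen']; omega)]
        have htk : (inp.take i ++ ['-'] ++ inp.drop i).take (i + 2 - 1) = inp.take i ++ ['-'] := by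
          rw [show i + 2 - 1 = i + 1 from rfl]
          rw [List.take_append_of_le_length (by simp [List.length_take]; omega)]
          rw [List.take_append]
          simp [List.length_take, Nat.min_eq_left (le_of_lt hi)]
        have hdr : (inp.take i ++ ['-'] ++ inp.drop i).drop (i + 2 - 1) = inp.drop i := by
          rw [show i + 2 - 1 = i + 1 from rfl]
          rw [List.drop_append_of_le_length (by simp [List.length_take]; omega)]
          simp [List.length_take, Nat.min_eq_left (le_of_lt hi)]
        rw [htk, hdr, hdrop1, hdrop2]
        rw [show pvDash (inp[i - 1] :: inp[i] :: inp.drop (i + 1)) =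
            inp[i - 1] :: '-' :: pvDash (inp[i] :: inp.drop (i + 1)) from by
          rw [pvDash]; simp [hab]]
        rw [htake, ← hdrop2]
        simp only [List.append_assoc, List.cons_append, List.nil_append]
      · simp only [hab]
        rw [ih f (by omega) inp (i + 1) (by omega) (by omega)]
        rw [show i + 1 - 1 = i from rfl]
        rw [hdrop1, hdrop2]
        rw [show pvDash (inp[i - 1] :: inp[i] :: inp.drop (i + 1)) =
            inp[i - 1] :: pvDash (inp[i] :: inp.drop (i + 1)) from by
          rw [pvDash]; simp [hab]]
        rw [htake, ← hdrop2]
        simp only [List.append_assoc, List.cons_append, List.nil_append, Bool.false_eq_true, if_false]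
    · simp only [hi, if_false]
      rw [pvDash_short _ (by simp; omega), List.take_append_drop]

-- ===== VERDICT (by name: the statement is the Claim_ definition above) =====
theorem insertDashes_spec : Claim_equal_insertDashes := by
  intro s _
  unfold Spec_insertDashes insertDashes insertDashes_alt
  simp only [pvGroups_eq]
  by_cases h : s.toList.length < 2
  · have hd : pvDash s.toList = s.toList := by
      match s.toList, h with
      | [], _ => rfl
      | [c], _ => rfl
    have h' : s.length ≤ 1 := by simpa [Nat.lt_succ_iff] using h
    simp [h', hd, String.ofList]
  · simp only [h, if_false]
    rw [pvLoopA_eq _ _ 1 le_rfl (by omega)]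
    simp
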